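-- pv_equiv track=rewrite | github.com/nian373/Machine-translation-for-Japanese-and-English-translations-with-Seq2Seq | Seq2Seq.py | preprocess_nmt
-- ===== SOURCE A (Python) =====
-- def preprocess_nmt(sentence):
--     """预处理单个句子"""
--     def no_space(char, prev_char):
--         return char in set(',.!?') and prev_char != ' '
--
--     sentence = sentence.replace('\u202f', ' ').replace('\xa0', ' ').lower()
--     out = []
--     for i, char in enumerate(sentence):
--         if i > 0 and no_space(char, sentence[i-1]):
--             out.append(' ')
--         out.append(char)
--     return ''.join(out)
-- ===== SOURCE B (Python) =====
-- import re
--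
-- def preprocess_nmt(sentence):
--     """预处理单个句子"""
--     sentence = sentence.replace('\u202f', ' ').replace('\xa0', ' ').lower()
--     return re.sub(r'(?<=[^ ])([,.!?])', r' \1', sentence)
-- ===== Notes on version B (the rewrite author's own statement) =====
-- stated objective: idiomatic
-- what changed: Replaces A's explicit enumerate loop with indexed lookback and list accumulator by a single regex substitution (lookbehind requiring a preceding non-space, inserting a space before the four punctuation marks) after the same normalization prefix.
import Mathlib
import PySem

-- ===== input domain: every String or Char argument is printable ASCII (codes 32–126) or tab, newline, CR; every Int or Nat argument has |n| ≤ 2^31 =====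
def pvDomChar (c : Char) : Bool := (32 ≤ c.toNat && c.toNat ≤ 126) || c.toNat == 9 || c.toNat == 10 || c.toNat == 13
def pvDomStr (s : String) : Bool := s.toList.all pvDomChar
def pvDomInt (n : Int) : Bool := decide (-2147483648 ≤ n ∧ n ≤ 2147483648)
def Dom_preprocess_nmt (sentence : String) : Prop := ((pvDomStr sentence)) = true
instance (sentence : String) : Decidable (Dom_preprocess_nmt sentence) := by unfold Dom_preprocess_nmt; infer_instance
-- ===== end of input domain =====

-- B replaces A's enumerate loop (indexed lookback, list accumulator) by a single regex
-- substitution re.sub(r'(?<=[^ ])([,.!?])', r' \1', s) after the same normalization (idiomatic).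

-- ===== PORT A =====
-- A's inner helper no_space(char, prev_char)
def pvNoSpace (c p : Char) : Bool :=
  (c == ',' || c == '.' || c == '!' || c == '?') && p != ' '

def preprocess_nmt (sentence : String) : String :=
  let s := PySem.Str.lower ((PySem.Str.replace (PySem.Str.replace sentence "\u202F" " ") "\u00A0" " "))
  let cs := s.toList
  let out := (PySem.List.enumerate cs 0).foldl
    (fun out ic =>
      if ic.1 > 0 ∧ pvNoSpace ic.2 ((PySem.List.pyGet? cs (ic.1 - 1)).getD ' ') = true
      then (out ++ [' ']) ++ [ic.2]
      else out ++ [ic.2]) []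
  String.ofList out

-- ===== PORT B =====
def pvIsPunct (c : Char) : Bool := c == ',' || c == '.' || c == '!' || c == '?'

-- Hand port (exact) of re.sub(r'(?<=[^ ])([,.!?])', r' \1', s): re.sub's left-to-right
-- non-overlapping scan of the source; `prev` is the source char just before the scan
-- position (none at position 0), which is what the lookbehind (?<=[^ ]) inspects; every
-- match has length 1, so the scan advances one source char per step.
def pvReSub (prev : Option Char) : List Char → List Char
  | [] => []
  | c :: rest =>
    (if pvIsPunct c && (match prev with | some p => p != ' ' | none => false)
     then [' ', c] else [c]) ++ pvReSub (some c) rest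

def preprocess_nmt_alt (sentence : String) : String :=
  let s := PySem.Str.lower ((PySem.Str.replace (PySem.Str.replace sentence "\u202F" " ") "\u00A0" " "))
  String.ofList (pvReSub none s.toList)

-- ===== PRECONDITION & SPEC =====
def Spec_preprocess_nmt (sentence : String) (out : String) : Prop := out = preprocess_nmt_alt sentence
instance (sentence : String) (out : String) : Decidable (Spec_preprocess_nmt sentence out) := by unfold Spec_preprocess_nmt; infer_instance

-- ===== CLAIM (what is proved, stated in full; the proofs are below) =====
def Claim_equal_preprocess_nmt : Prop := ∀ (sentence : String), Dom_preprocess_nmt sentence → Spec_preprocess_nmt sentence (preprocess_nmt sentence)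

-- ===== LEMMAS AND PROOFS =====

-- the piece contributed for current char c after previous char p
def pvChunk (p c : Char) : List Char :=
  if pvIsPunct c && p != ' ' then [' ', c] else [c]

-- spec-level recursion: pieces produced after a prefix ending in p
def pvPairs : Char → List Char → List Char
  | _, [] => []
  | p, c :: rest => pvChunk p c ++ pvPairs c rest

lemma pvReSub_some (rest : List Char) : ∀ p, pvReSub (some p) rest = pvPairs p rest := by
  induction rest with
  | nil => intro p; rfl
  | cons c rest ih => intro p; simp only [pvReSub, pvPairs, pvChunk, ih c]

lemma pvGetLast (pre : List Char) (c : Char) (rest : List Char) (h : pre ≠ []) :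
    (PySem.List.pyGet? (pre ++ c :: rest) ((pre.length : Int) - 1)).getD ' '
      = pre.getLast h := by
  have hlen : 0 < pre.length := List.length_pos_iff.mpr h
  have h1 : ((pre.length : Int) - 1) = ((pre.length - 1 : Nat) : Int) := by omega
  rw [h1, PySem.List.pyGet?_natCast]
  have hlt : pre.length - 1 < (pre ++ c :: rest).length := by simp; omega
  rw [List.getElem?_eq_getElem hlt, List.getElem_append_left (by omega)]
  simp [List.getLast_eq_getElem]

lemma pvLoopA (rest : List Char) : ∀ (pre acc : List Char) (h : pre ≠ []),
    (PySem.List.enumerate rest (pre.length : Int)).foldl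
      (fun out ic =>
        if ic.1 > 0 ∧ pvNoSpace ic.2 ((PySem.List.pyGet? (pre ++ rest) (ic.1 - 1)).getD ' ') = true
        then (out ++ [' ']) ++ [ic.2]
        else out ++ [ic.2]) acc
      = acc ++ pvPairs (pre.getLast h) rest := by
  induction rest with
  | nil => intro pre acc h; simp [PySem.List.enumerate_nil, pvPairs]
  | cons c rest ih =>
    intro pre acc h
    have hlen : 0 < pre.length := List.length_pos_iff.mpr h
    rw [PySem.List.enumerate_cons]
    simp only [List.foldl_cons]
    rw [pvGetLast pre c rest h]
    have hpre' : pre ++ [c] ≠ [] := by simp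
    have hstep := ih (pre ++ [c])
      (if (pre.length : Int) > 0 ∧ pvNoSpace c (pre.getLast h) = true
        then (acc ++ [' ']) ++ [c] else acc ++ [c]) hpre'
    rw [show (pre ++ [c]).getLast hpre' = c from by simp] at hstep
    simp only [List.length_append, List.length_cons, List.length_nil, Nat.cast_add,
      Nat.cast_one, zero_add, List.append_assoc,
      List.cons_append, List.nil_append] at hstep ⊢
    rw [hstep]
    have hpos : ((pre.length : Int) > 0) := by exact_mod_cast hlen
    simp only [pvPairs]
    unfold pvChunk pvNoSpace pvIsPunct
    by_cases hns : ((c == ',' || c == '.' || c == '!' || c == '?') && pre.getLast h != ' ') = true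
    · rw [if_pos ⟨hpos, hns⟩, if_pos hns]
      simp
    · rw [if_neg (fun hc => hns hc.2), if_neg hns]
      simp

lemma pvMain (cs : List Char) :
    String.ofList ((PySem.List.enumerate cs 0).foldl
      (fun out ic =>
        if ic.1 > 0 ∧ pvNoSpace ic.2 ((PySem.List.pyGet? cs (ic.1 - 1)).getD ' ') = true
        then (out ++ [' ']) ++ [ic.2]
        else out ++ [ic.2]) [])
    = String.ofList (pvReSub none cs) := by
  cases cs with
  | nil => rfl
  | cons c0 rest =>
    simp only [pvReSub, Bool.and_false, Bool.false_eq_true, if_false]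
    rw [pvReSub_some rest c0]
    rw [PySem.List.enumerate_cons]
    simp only [List.foldl_cons]
    have h0 : ¬ ((0 : Int) > 0 ∧ pvNoSpace c0 ((PySem.List.pyGet? (c0 :: rest) ((0:Int) - 1)).getD ' ') = true) := by
      intro h; exact absurd h.1 (by decide)
    rw [if_neg h0]
    have h1 := pvLoopA rest [c0] ([] ++ [c0]) (by simp)
    simp only [List.cons_append, List.nil_append, List.length_cons, List.length_nil,
      List.getLast_singleton] at h1
    norm_num at h1 ⊢
    rw [h1]

-- ===== VERDICT (by name: the statement is the Claim_ definition above) =====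
theorem preprocess_nmt_spec : Claim_equal_preprocess_nmt := by
  intro sentence _
  show preprocess_nmt sentence = preprocess_nmt_alt sentence
  unfold preprocess_nmt preprocess_nmt_alt
  dsimp only
  exact pvMain _
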